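-- pv_equiv track=rewrite | github.com/LeivaDiego/Laboratorio-AB-Compiladores | Lab AB/regex_parser.py | plus_operator_conversion
-- ===== SOURCE A (Python) =====
-- def plus_operator_conversion(regex):
--
-- 	i = 0
-- 	transformed_exp = ""
--
-- 	# Bucle que recorre la expresion regular
-- 	while i < len(regex):
--
-- 		# Si encuentra un '+' verifica el caracter anterior
-- 		if regex[i] == '+':
-- 			# si es un parentesis, busca el parentesis correspondiente y reemplaza por '*'
-- 			if regex[i-1] == ')':
-- 				for j in range(i-1, -1, -1):
-- 					if regex[j] == '(':
-- 						transformed_exp += regex[j:i] + "*"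
--
-- 			else:
-- 				transformed_exp += regex[i-1] + '*'
-- 		else:
-- 			transformed_exp += regex[i]
-- 		i += 1
-- 	return transformed_exp
-- ===== SOURCE B (Python) =====
-- def plus_operator_conversion(regex):
--     # One left-to-right pass; '(' positions are collected as we go, so a '+' after ')'
--     # replays only the recorded '(' positions instead of rescanning the whole prefix.
--     opens = []
--     out = []
--     for i, c in enumerate(regex):
--         if c == '+':
--             if regex[i - 1] == ')':
--                 for j in reversed(opens):
--                     out.append(regex[j:i])
--                     out.append('*')
--             else:
--                 out.append(regex[i - 1])
--                 out.append('*')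
--         else:
--             if c == '(':
--                 opens.append(i)
--             out.append(c)
--     return ''.join(out)
-- ===== Notes on version B (the rewrite author's own statement) =====
-- stated objective: faster
-- what changed: B makes a single pass that records '(' positions as it scans and, at each '+' following ')', replays only those recorded positions, instead of A's full backward rescan of the entire prefix at every such '+'; output chunks are collected in a list and joined once instead of repeated string concatenation.
import Mathlib
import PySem

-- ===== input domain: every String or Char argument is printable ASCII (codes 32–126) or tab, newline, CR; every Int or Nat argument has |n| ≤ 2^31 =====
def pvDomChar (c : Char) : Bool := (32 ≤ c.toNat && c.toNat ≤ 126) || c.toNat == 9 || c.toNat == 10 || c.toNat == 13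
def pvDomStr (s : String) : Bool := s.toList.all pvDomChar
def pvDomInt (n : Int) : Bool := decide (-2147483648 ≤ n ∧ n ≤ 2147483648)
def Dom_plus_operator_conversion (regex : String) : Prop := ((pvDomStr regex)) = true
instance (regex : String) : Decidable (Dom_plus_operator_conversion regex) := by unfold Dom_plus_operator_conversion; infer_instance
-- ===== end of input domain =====

-- B replaces A's full backward rescan of the prefix at each '+' by a single pass that
-- records '(' positions as they are seen and replays only those (objective: faster).

-- ===== PORT A =====
-- inner 'for j in range(i-1, -1, -1): if regex[j] == '(': transformed_exp += regex[j:i] + "*"'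
def pvAInner (cs : List Char) (i : Int) (acc : List Char) : List Char :=
  (PySem.List.pyRange (i - 1) (-1) (-1)).foldl (fun acc2 j =>
    if PySem.List.pyGet? cs j = some '(' then
      acc2 ++ PySem.List.slice cs (some j) (some i) ++ ['*']
    else acc2) acc

-- one iteration of A's while loop body at index i
def pvAStep (cs : List Char) (acc : List Char) (i : Int) : List Char :=
  if PySem.List.pyGet? cs i = some '+' then
    if PySem.List.pyGet? cs (i - 1) = some ')' then
      pvAInner cs i acc
    else acc ++ (PySem.List.pyGet? cs (i - 1)).toList ++ ['*']
  else acc ++ (PySem.List.pyGet? cs i).toList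

def plus_operator_conversion (regex : String) : String :=
  String.ofList ((PySem.List.pyRange 0 (regex.toList.length : Int) 1).foldl
    (pvAStep regex.toList) [])

-- ===== PORT B =====
-- one iteration of B's for loop: state = (opens, out)
def pvBStep (cs : List Char) (st : List Int × List Char) (p : Int × Char) :
    List Int × List Char :=
  if p.2 = '+' then
    if PySem.List.pyGet? cs (p.1 - 1) = some ')' then
      (st.1, st.1.reverse.foldl
        (fun o j => o ++ PySem.List.slice cs (some j) (some p.1) ++ ['*']) st.2)
    else (st.1, st.2 ++ (PySem.List.pyGet? cs (p.1 - 1)).toList ++ ['*'])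
  else ((if p.2 = '(' then st.1 ++ [p.1] else st.1), st.2 ++ [p.2])

def plus_operator_conversion_alt (regex : String) : String :=
  String.ofList ((PySem.List.enumerate regex.toList 0).foldl
    (pvBStep regex.toList) ([], [])).2

-- ===== PRECONDITION & SPEC =====
def Spec_plus_operator_conversion (regex : String) (out : String) : Prop := out = plus_operator_conversion_alt regex
instance (regex : String) (out : String) : Decidable (Spec_plus_operator_conversion regex out) := by unfold Spec_plus_operator_conversion; infer_instance

-- ===== CLAIM (what is proved, stated in full; the proofs are below) =====
def Claim_equal_plus_operator_conversion : Prop := ∀ (regex : String), Dom_plus_operator_conversion regex → Spec_plus_operator_conversion regex (plus_operator_conversion regex)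

-- ===== LEMMAS AND PROOFS =====

-- the '(' positions among indices 0..k-1, ascending (B's 'opens' after k steps)
def pvOpens (cs : List Char) (k : Int) : List Int :=
  (PySem.List.pyRange 0 k 1).filter (fun j => decide (PySem.List.pyGet? cs j = some '('))

-- A's inner backward scan equals B's replay of the recorded '(' positions
lemma pvAInner_eq (cs : List Char) (k : Int) (acc : List Char) :
    pvAInner cs k acc
      = (pvOpens cs k).reverse.foldl
          (fun o j => o ++ PySem.List.slice cs (some j) (some k) ++ ['*']) acc := by
  unfold pvAInner pvOpens
  rw [PySem.List.pyRange_neg_one_eq_reverse]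
  have h1 : (-1 : Int) + 1 = 0 := by ring
  have h2 : k - 1 + 1 = k := by ring
  rw [h1, h2]
  rw [PySem.List.foldl_ite_eq_foldl_filter
    (p := fun j => PySem.List.pyGet? cs j = some '(')
    (f := fun acc2 j => acc2 ++ PySem.List.slice cs (some j) (some k) ++ ['*'])]
  rw [List.filter_reverse]

-- main invariant: after the first k steps, B's state is (recorded opens, A's output)
lemma pv_inv (cs : List Char) (d : Char) (k : Nat) (hk : k ≤ cs.length) :
    (PySem.List.pyRange 0 (k : Int) 1).foldl
        (fun st j => pvBStep cs st (j, PySem.List.pyGetD cs j d)) ([], [])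
      = (pvOpens cs (k : Int),
         (PySem.List.pyRange 0 (k : Int) 1).foldl (pvAStep cs) []) := by
  induction k with
  | zero =>
      simp [pvOpens]
  | succ k ih =>
      have hk' : k ≤ cs.length := Nat.le_of_succ_le hk
      have hlt : k < cs.length := hk
      have hcast : ((k + 1 : Nat) : Int) = (k : Int) + 1 := by push_cast; ring
      have hsplit : PySem.List.pyRange 0 ((k : Int) + 1) 1
          = PySem.List.pyRange 0 (k : Int) 1 ++ [(k : Int)] :=
        PySem.List.pyRange_one_succ_right (by positivity)
      rw [hcast, hsplit, List.foldl_append, List.foldl_append, ih hk']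
      have hget : PySem.List.pyGet? cs (k : Int) = some cs[k] := by
        rw [PySem.List.pyGet?_natCast, List.getElem?_eq_getElem hlt]
      have hgetD : PySem.List.pyGetD cs (k : Int) d = cs[k] := by
        rw [PySem.List.pyGetD_eq_getElem cs d (by positivity) (by exact_mod_cast hlt)]
        simp
      have hopens : pvOpens cs ((k : Int) + 1)
          = pvOpens cs (k : Int)
            ++ (if PySem.List.pyGet? cs (k : Int) = some '(' then [(k : Int)] else []) := by
        unfold pvOpens
        rw [hsplit, List.filter_append]
        by_cases h : cs[k]? = some '(' <;> simp [List.filter, h]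
      simp only [List.foldl_cons, List.foldl_nil]
      rw [hopens]
      unfold pvBStep pvAStep
      simp only [hget, hgetD, Option.some.injEq]
      by_cases hplus : cs[k] = '+'
      · simp only [hplus, if_true]
        by_cases hprev : PySem.List.pyGet? cs ((k : Int) - 1) = some ')'
        · simp [hprev, pvAInner_eq]
        · simp [hprev]
      · have hne : ¬ (cs[k] = '+') := hplus
        simp only [if_neg hne]
        by_cases hpar : cs[k] = '('
        · simp [hpar]
        · simp [hpar]

-- ===== VERDICT (by name: the statement is the Claim_ definition above) =====
theorem plus_operator_conversion_spec : Claim_equal_plus_operator_conversion := by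
  intro regex _
  unfold Spec_plus_operator_conversion plus_operator_conversion plus_operator_conversion_alt
  rw [PySem.List.enumerate_eq_map_pyRange regex.toList 'a', List.foldl_map]
  have hlen : PySem.List.len regex.toList = (regex.toList.length : Int) := by
    simp [PySem.List.len_eq]
  rw [hlen, pv_inv regex.toList 'a' regex.toList.length le_rfl]
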